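-- pv_equiv track=rewrite | github.com/DrewYomantas/Copperline | lead_engine/outreach/email_draft_agent.py | _subject_options_for_angle
-- ===== SOURCE A (Python) =====
-- from typing import Dict, List, Optional, Tuple
--
-- def _subject_options_for_angle(angle: str, observation: str) -> List[str]:
--     obs_lower = observation.lower()
--     if angle == "after_hours_response":
--         if "emergency" in obs_lower or "urgent" in obs_lower:
--             return ["emergency calls", "after-hours calls", "after-hours follow-up"]
--         if "weekend" in obs_lower or "nights" in obs_lower:
--             return ["after-hours calls", "after-hours follow-up", "weekend calls"]
--         return ["after-hours calls", "after-hours follow-up", "after-hours response"]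
--     if angle == "estimate_follow_up":
--         if "quote" in obs_lower:
--             return ["quote requests", "estimate follow-up", "quote follow-up"]
--         return ["estimate follow-up", "estimate requests", "quote follow-up"]
--     if angle == "service_requests":
--         if "appointment" in obs_lower or "booking" in obs_lower:
--             return ["appointment requests", "new bookings", "service requests"]
--         if "scheduling" in obs_lower or "schedule" in obs_lower:
--             return ["scheduling follow-up", "service requests", "new requests"]
--         return ["service requests", "new requests", "service request follow-up"]
--     if angle == "inquiry_routing":
--         if "contact form" in obs_lower:
--             return ["contact form follow-up", "form inquiries", "contact form inquiries"]
--         if "text" in obs_lower or "chat" in obs_lower or "message" in obs_lower: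
--             return ["new messages", "incoming inquiries", "inquiry follow-up"]
--         return ["new inquiries", "inquiry follow-up", "incoming inquiries"]
--     if angle == "callback_recovery":
--         if "voicemail" in obs_lower or "dispatch" in obs_lower:
--             return ["missed calls", "voicemail follow-up", "callback follow-up"]
--         return ["missed calls", "callback follow-up", "call follow-up"]
--     if any(kw in obs_lower for kw in ("missed call", "callback", "voicemail", "phone")):
--         return ["missed calls", "callback follow-up", "call follow-up"]
--     if any(kw in obs_lower for kw in ("estimate", "quote", "proposal")):
--         return ["estimate follow-up", "estimate requests", "quote follow-up"]
--     if any(kw in obs_lower for kw in ("contact form", "inquiry", "message", "form")):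
--         return ["new inquiries", "inquiry follow-up", "contact follow-up"]
--     return ["missed calls", "new inquiries", "follow-up timing"]
-- ===== SOURCE B (Python) =====
-- from typing import Dict, List, Tuple
--
-- # Each angle maps to (keyword->group pairs, results array). Group i's result sits
-- # at results[i]; the default result is the LAST entry. B makes one full pass over
-- # the keyword map collecting every matching group index, then selects the minimum
-- # matched group (or the default index) into the results array.
-- _TABLE: Dict[str, Tuple[List[Tuple[str, int]], List[List[str]]]] = {
--     "after_hours_response": (
--         [("emergency", 0), ("urgent", 0), ("weekend", 1), ("nights", 1)],
--         [["emergency calls", "after-hours calls", "after-hours follow-up"],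
--          ["after-hours calls", "after-hours follow-up", "weekend calls"],
--          ["after-hours calls", "after-hours follow-up", "after-hours response"]],
--     ),
--     "estimate_follow_up": (
--         [("quote", 0)],
--         [["quote requests", "estimate follow-up", "quote follow-up"],
--          ["estimate follow-up", "estimate requests", "quote follow-up"]],
--     ),
--     "service_requests": (
--         [("appointment", 0), ("booking", 0), ("scheduling", 1), ("schedule", 1)],
--         [["appointment requests", "new bookings", "service requests"],
--          ["scheduling follow-up", "service requests", "new requests"],
--          ["service requests", "new requests", "service request follow-up"]],
--     ),
--     "inquiry_routing": (
--         [("contact form", 0), ("text", 1), ("chat", 1), ("message", 1)],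
--         [["contact form follow-up", "form inquiries", "contact form inquiries"],
--          ["new messages", "incoming inquiries", "inquiry follow-up"],
--          ["new inquiries", "inquiry follow-up", "incoming inquiries"]],
--     ),
--     "callback_recovery": (
--         [("voicemail", 0), ("dispatch", 0)],
--         [["missed calls", "voicemail follow-up", "callback follow-up"],
--          ["missed calls", "callback follow-up", "call follow-up"]],
--     ),
-- }
--
-- _GENERAL: Tuple[List[Tuple[str, int]], List[List[str]]] = (
--     [("missed call", 0), ("callback", 0), ("voicemail", 0), ("phone", 0),
--      ("estimate", 1), ("quote", 1), ("proposal", 1),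
--      ("contact form", 2), ("inquiry", 2), ("message", 2), ("form", 2)],
--     [["missed calls", "callback follow-up", "call follow-up"],
--      ["estimate follow-up", "estimate requests", "quote follow-up"],
--      ["new inquiries", "inquiry follow-up", "contact follow-up"],
--      ["missed calls", "new inquiries", "follow-up timing"]],
-- )
--
--
-- def _subject_options_for_angle(angle: str, observation: str) -> List[str]:
--     obs = observation.lower()
--     kwmap, results = _TABLE.get(angle, _GENERAL)
--     hits = [g for kw, g in kwmap if kw in obs]
--     return results[min(hits) if hits else len(results) - 1]
-- ===== Notes on version B (the rewrite author's own statement) =====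
-- stated objective: alternative
-- what changed: A's short-circuiting if/elif keyword cascade is replaced by a priority-encoder: B makes one full pass collecting every matched keyword's group index, takes the minimum matched group (default = last index) and indexes a per-angle results array.
import Mathlib
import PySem

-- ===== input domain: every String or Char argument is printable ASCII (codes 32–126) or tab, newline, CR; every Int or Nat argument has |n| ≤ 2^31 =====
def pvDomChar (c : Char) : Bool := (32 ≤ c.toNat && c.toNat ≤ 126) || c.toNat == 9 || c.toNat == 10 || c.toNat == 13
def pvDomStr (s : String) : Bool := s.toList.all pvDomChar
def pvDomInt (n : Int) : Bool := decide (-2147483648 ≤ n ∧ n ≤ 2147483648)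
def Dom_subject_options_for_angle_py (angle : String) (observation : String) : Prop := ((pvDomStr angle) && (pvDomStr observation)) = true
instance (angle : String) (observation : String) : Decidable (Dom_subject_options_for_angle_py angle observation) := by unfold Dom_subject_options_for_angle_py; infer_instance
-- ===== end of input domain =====

-- B replaces A's short-circuiting if/elif keyword cascade by a priority encoder: one full
-- pass collects every matched keyword's group index, the minimum group (default = last
-- index) selects into a per-angle results array (objective: alternative decomposition).

-- ===== PORT A =====
-- literal transliteration of the if/elif cascade of _subject_options_for_angle
def subject_options_for_angle_py (angle : String) (observation : String) : List String :=
  let obs_lower := PySem.Str.lower observation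
  if angle == "after_hours_response" then
    if PySem.Str.isIn "emergency" obs_lower || PySem.Str.isIn "urgent" obs_lower then
      ["emergency calls", "after-hours calls", "after-hours follow-up"]
    else if PySem.Str.isIn "weekend" obs_lower || PySem.Str.isIn "nights" obs_lower then
      ["after-hours calls", "after-hours follow-up", "weekend calls"]
    else
      ["after-hours calls", "after-hours follow-up", "after-hours response"]
  else if angle == "estimate_follow_up" then
    if PySem.Str.isIn "quote" obs_lower then
      ["quote requests", "estimate follow-up", "quote follow-up"]
    else
      ["estimate follow-up", "estimate requests", "quote follow-up"]
  else if angle == "service_requests" then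
    if PySem.Str.isIn "appointment" obs_lower || PySem.Str.isIn "booking" obs_lower then
      ["appointment requests", "new bookings", "service requests"]
    else if PySem.Str.isIn "scheduling" obs_lower || PySem.Str.isIn "schedule" obs_lower then
      ["scheduling follow-up", "service requests", "new requests"]
    else
      ["service requests", "new requests", "service request follow-up"]
  else if angle == "inquiry_routing" then
    if PySem.Str.isIn "contact form" obs_lower then
      ["contact form follow-up", "form inquiries", "contact form inquiries"]
    else if PySem.Str.isIn "text" obs_lower || PySem.Str.isIn "chat" obs_lower || PySem.Str.isIn "message" obs_lower then
      ["new messages", "incoming inquiries", "inquiry follow-up"]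
    else
      ["new inquiries", "inquiry follow-up", "incoming inquiries"]
  else if angle == "callback_recovery" then
    if PySem.Str.isIn "voicemail" obs_lower || PySem.Str.isIn "dispatch" obs_lower then
      ["missed calls", "voicemail follow-up", "callback follow-up"]
    else
      ["missed calls", "callback follow-up", "call follow-up"]
  else if (["missed call", "callback", "voicemail", "phone"] : List String).any (fun kw => PySem.Str.isIn kw obs_lower) then
    ["missed calls", "callback follow-up", "call follow-up"]
  else if (["estimate", "quote", "proposal"] : List String).any (fun kw => PySem.Str.isIn kw obs_lower) then
    ["estimate follow-up", "estimate requests", "quote follow-up"]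
  else if (["contact form", "inquiry", "message", "form"] : List String).any (fun kw => PySem.Str.isIn kw obs_lower) then
    ["new inquiries", "inquiry follow-up", "contact follow-up"]
  else
    ["missed calls", "new inquiries", "follow-up timing"]

-- ===== PORT B =====
-- B's data: angle → (keyword → group-index pairs, results array; default = last entry)
def pvTable : PySem.Dict String (List (String × Nat) × List (List String)) :=
  ⟨[ ("after_hours_response",
      ([("emergency", 0), ("urgent", 0), ("weekend", 1), ("nights", 1)],
       [["emergency calls", "after-hours calls", "after-hours follow-up"],
        ["after-hours calls", "after-hours follow-up", "weekend calls"],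
        ["after-hours calls", "after-hours follow-up", "after-hours response"]])),
    ("estimate_follow_up",
      ([("quote", 0)],
       [["quote requests", "estimate follow-up", "quote follow-up"],
        ["estimate follow-up", "estimate requests", "quote follow-up"]])),
    ("service_requests",
      ([("appointment", 0), ("booking", 0), ("scheduling", 1), ("schedule", 1)],
       [["appointment requests", "new bookings", "service requests"],
        ["scheduling follow-up", "service requests", "new requests"],
        ["service requests", "new requests", "service request follow-up"]])),
    ("inquiry_routing",
      ([("contact form", 0), ("text", 1), ("chat", 1), ("message", 1)],
       [["contact form follow-up", "form inquiries", "contact form inquiries"],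
        ["new messages", "incoming inquiries", "inquiry follow-up"],
        ["new inquiries", "inquiry follow-up", "incoming inquiries"]])),
    ("callback_recovery",
      ([("voicemail", 0), ("dispatch", 0)],
       [["missed calls", "voicemail follow-up", "callback follow-up"],
        ["missed calls", "callback follow-up", "call follow-up"]])) ]⟩

def pvGeneral : List (String × Nat) × List (List String) :=
  ([("missed call", 0), ("callback", 0), ("voicemail", 0), ("phone", 0),
    ("estimate", 1), ("quote", 1), ("proposal", 1),
    ("contact form", 2), ("inquiry", 2), ("message", 2), ("form", 2)],
   [["missed calls", "callback follow-up", "call follow-up"],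
    ["estimate follow-up", "estimate requests", "quote follow-up"],
    ["new inquiries", "inquiry follow-up", "contact follow-up"],
    ["missed calls", "new inquiries", "follow-up timing"]])

def subject_options_for_angle_py_alt (angle : String) (observation : String) : List String :=
  let obs := PySem.Str.lower observation
  let entry := (PySem.Dict.get? pvTable angle).getD pvGeneral    -- _TABLE.get(angle, _GENERAL)
  let kwmap := entry.1
  let results := entry.2
  let hits := (kwmap.filter (fun p => PySem.Str.isIn p.1 obs)).map Prod.snd
  -- results[idx]: idx is always in range by construction, so getD's fallback is never taken
  let idx := if hits.isEmpty then results.length - 1 else (PySem.List.min? hits (fun g => g)).getD 0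
  results.getD idx []

-- ===== PRECONDITION & SPEC =====
def Spec_subject_options_for_angle_py (angle : String) (observation : String) (out : List String) : Prop := out = subject_options_for_angle_py_alt angle observation
instance (angle : String) (observation : String) (out : List String) : Decidable (Spec_subject_options_for_angle_py angle observation out) := by unfold Spec_subject_options_for_angle_py; infer_instance

-- ===== CLAIM (what is proved, stated in full; the proofs are below) =====
def Claim_equal_subject_options_for_angle_py : Prop := ∀ (angle : String) (observation : String), Dom_subject_options_for_angle_py angle observation → Spec_subject_options_for_angle_py angle observation (subject_options_for_angle_py angle observation)

-- ===== LEMMAS AND PROOFS =====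

-- min? (with identity key) returns m when m is a member that is a lower bound
theorem pv_min?_eq (l : List Nat) (m : Nat) (hm : m ∈ l) (hle : ∀ y ∈ l, m ≤ y) :
    PySem.List.min? l (fun g => g) = some m := by
  cases h : PySem.List.min? l (fun g => g) with
  | none =>
      rw [PySem.List.min?_eq_none_iff] at h
      subst h; cases hm
  | some k =>
      have hk := PySem.List.min?_mem h
      have h1 := PySem.List.min?_isMin h m hm
      have h1' : k ≤ m := h1
      have h2 := hle k hk
      have : k = m := Nat.le_antisymm h1' h2
      rw [this]

-- ===== VERDICT (by name: the statement is the Claim_ definition above) =====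
theorem subject_options_for_angle_py_spec : Claim_equal_subject_options_for_angle_py := by
  intro angle observation _
  unfold Spec_subject_options_for_angle_py subject_options_for_angle_py subject_options_for_angle_py_alt
  by_cases h1 : angle = "after_hours_response"
  · subst h1
    by_cases he : PySem.Chars.isIn ['e','m','e','r','g','e','n','c','y'] (PySem.Chars.lower observation.toList) = true <;>
    by_cases hu : PySem.Chars.isIn ['u','r','g','e','n','t'] (PySem.Chars.lower observation.toList) = true <;>
    by_cases hw : PySem.Chars.isIn ['w','e','e','k','e','n','d'] (PySem.Chars.lower observation.toList) = true <;>
    by_cases hn : PySem.Chars.isIn ['n','i','g','h','t','s'] (PySem.Chars.lower observation.toList) = true <;>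
    simp [pvTable, PySem.Dict.get?, PySem.List.min?, he, hu, hw, hn]
  by_cases h2 : angle = "estimate_follow_up"
  · subst h2
    by_cases hq : PySem.Chars.isIn ['q','u','o','t','e'] (PySem.Chars.lower observation.toList) = true <;>
    simp [pvTable, PySem.Dict.get?, PySem.List.min?, hq]
  by_cases h3 : angle = "service_requests"
  · subst h3
    by_cases ha : PySem.Chars.isIn ['a','p','p','o','i','n','t','m','e','n','t'] (PySem.Chars.lower observation.toList) = true <;>
    by_cases hb : PySem.Chars.isIn ['b','o','o','k','i','n','g'] (PySem.Chars.lower observation.toList) = true <;>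
    by_cases hs : PySem.Chars.isIn ['s','c','h','e','d','u','l','i','n','g'] (PySem.Chars.lower observation.toList) = true <;>
    by_cases hc : PySem.Chars.isIn ['s','c','h','e','d','u','l','e'] (PySem.Chars.lower observation.toList) = true <;>
    simp [pvTable, PySem.Dict.get?, PySem.List.min?, ha, hb, hs, hc]
  by_cases h4 : angle = "inquiry_routing"
  · subst h4
    by_cases hf : PySem.Chars.isIn ['c','o','n','t','a','c','t',' ','f','o','r','m'] (PySem.Chars.lower observation.toList) = true <;>
    by_cases ht : PySem.Chars.isIn ['t','e','x','t'] (PySem.Chars.lower observation.toList) = true <;>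
    by_cases hh : PySem.Chars.isIn ['c','h','a','t'] (PySem.Chars.lower observation.toList) = true <;>
    by_cases hm : PySem.Chars.isIn ['m','e','s','s','a','g','e'] (PySem.Chars.lower observation.toList) = true <;>
    simp [pvTable, PySem.Dict.get?, PySem.List.min?, hf, ht, hh, hm]
  by_cases h5 : angle = "callback_recovery"
  · subst h5
    by_cases hv : PySem.Chars.isIn ['v','o','i','c','e','m','a','i','l'] (PySem.Chars.lower observation.toList) = true <;>
    by_cases hd : PySem.Chars.isIn ['d','i','s','p','a','t','c','h'] (PySem.Chars.lower observation.toList) = true <;>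
    simp [pvTable, PySem.Dict.get?, PySem.List.min?, hv, hd]
  -- general branch
  · have g1 : ("after_hours_response" == angle) = false := beq_eq_false_iff_ne.mpr (fun h => h1 h.symm)
    have g2 : ("estimate_follow_up" == angle) = false := beq_eq_false_iff_ne.mpr (fun h => h2 h.symm)
    have g3 : ("service_requests" == angle) = false := beq_eq_false_iff_ne.mpr (fun h => h3 h.symm)
    have g4 : ("inquiry_routing" == angle) = false := beq_eq_false_iff_ne.mpr (fun h => h4 h.symm)
    have g5 : ("callback_recovery" == angle) = false := beq_eq_false_iff_ne.mpr (fun h => h5 h.symm)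
    have f1 : (angle == "after_hours_response") = false := beq_eq_false_iff_ne.mpr h1
    have f2 : (angle == "estimate_follow_up") = false := beq_eq_false_iff_ne.mpr h2
    have f3 : (angle == "service_requests") = false := beq_eq_false_iff_ne.mpr h3
    have f4 : (angle == "inquiry_routing") = false := beq_eq_false_iff_ne.mpr h4
    have f5 : (angle == "callback_recovery") = false := beq_eq_false_iff_ne.mpr h5
    simp [pvTable, pvGeneral, PySem.Dict.get?, g1, g2, g3, g4, g5, f1, f2, f3, f4, f5]
    by_cases hA : (PySem.Chars.isIn ['m','i','s','s','e','d',' ','c','a','l','l'] (PySem.Chars.lower observation.toList) = true ∨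
        PySem.Chars.isIn ['c','a','l','l','b','a','c','k'] (PySem.Chars.lower observation.toList) = true ∨
        PySem.Chars.isIn ['v','o','i','c','e','m','a','i','l'] (PySem.Chars.lower observation.toList) = true ∨
        PySem.Chars.isIn ['p','h','o','n','e'] (PySem.Chars.lower observation.toList) = true)
    · have h0 : (0 : Nat) ∈ List.map Prod.snd (List.filter (fun p => PySem.Chars.isIn p.1.toList (PySem.Chars.lower observation.toList)) [("missed call", 0), ("callback", 0), ("voicemail", 0), ("phone", 0), ("estimate", 1), ("quote", 1), ("proposal", 1), ("contact form", 2), ("inquiry", 2), ("message", 2), ("form", 2)]) := by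
        simp
        tauto
      have hmin := pv_min?_eq _ 0 h0 (fun y _ => Nat.zero_le y)
      rw [hmin]
      rcases hA with hk | hk | hk | hk <;> simp [hk]
    · simp at hA
      obtain ⟨a1, a2, a3, a4⟩ := hA
      by_cases hB : (PySem.Chars.isIn ['e','s','t','i','m','a','t','e'] (PySem.Chars.lower observation.toList) = true ∨
          PySem.Chars.isIn ['q','u','o','t','e'] (PySem.Chars.lower observation.toList) = true ∨
          PySem.Chars.isIn ['p','r','o','p','o','s','a','l'] (PySem.Chars.lower observation.toList) = true)
      · have h1m : (1 : Nat) ∈ List.map Prod.snd (List.filter (fun p => PySem.Chars.isIn p.1.toList (PySem.Chars.lower observation.toList)) [("missed call", 0), ("callback", 0), ("voicemail", 0), ("phone", 0), ("estimate", 1), ("quote", 1), ("proposal", 1), ("contact form", 2), ("inquiry", 2), ("message", 2), ("form", 2)]) := by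
          simp
          tauto
        have hlb : ∀ y ∈ List.map Prod.snd (List.filter (fun p => PySem.Chars.isIn p.1.toList (PySem.Chars.lower observation.toList)) [("missed call", 0), ("callback", 0), ("voicemail", 0), ("phone", 0), ("estimate", 1), ("quote", 1), ("proposal", 1), ("contact form", 2), ("inquiry", 2), ("message", 2), ("form", 2)]), 1 ≤ y := by
          intro y hy
          simp [a1, a2, a3, a4] at hy
          rcases hy with ⟨_, h⟩ | ⟨_, h⟩ | ⟨_, h⟩ | ⟨_, h⟩ | ⟨_, h⟩ | ⟨_, h⟩ | ⟨_, h⟩ <;> omega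
        have hmin := pv_min?_eq _ 1 h1m hlb
        rw [hmin]
        rcases hB with hk | hk | hk <;> simp [hk, a1, a2, a3, a4]
      · simp at hB
        obtain ⟨b1, b2, b3⟩ := hB
        by_cases hC : (PySem.Chars.isIn ['c','o','n','t','a','c','t',' ','f','o','r','m'] (PySem.Chars.lower observation.toList) = true ∨
            PySem.Chars.isIn ['i','n','q','u','i','r','y'] (PySem.Chars.lower observation.toList) = true ∨
            PySem.Chars.isIn ['m','e','s','s','a','g','e'] (PySem.Chars.lower observation.toList) = true ∨
            PySem.Chars.isIn ['f','o','r','m'] (PySem.Chars.lower observation.toList) = true)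
        · have h2m : (2 : Nat) ∈ List.map Prod.snd (List.filter (fun p => PySem.Chars.isIn p.1.toList (PySem.Chars.lower observation.toList)) [("missed call", 0), ("callback", 0), ("voicemail", 0), ("phone", 0), ("estimate", 1), ("quote", 1), ("proposal", 1), ("contact form", 2), ("inquiry", 2), ("message", 2), ("form", 2)]) := by
            simp
            tauto
          have hlb : ∀ y ∈ List.map Prod.snd (List.filter (fun p => PySem.Chars.isIn p.1.toList (PySem.Chars.lower observation.toList)) [("missed call", 0), ("callback", 0), ("voicemail", 0), ("phone", 0), ("estimate", 1), ("quote", 1), ("proposal", 1), ("contact form", 2), ("inquiry", 2), ("message", 2), ("form", 2)]), 2 ≤ y := by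
            intro y hy
            simp [a1, a2, a3, a4, b1, b2, b3] at hy
            rcases hy with ⟨_, h⟩ | ⟨_, h⟩ | ⟨_, h⟩ | ⟨_, h⟩ <;> omega
          have hmin := pv_min?_eq _ 2 h2m hlb
          rw [hmin]
          rcases hC with hk | hk | hk | hk <;> simp [hk, a1, a2, a3, a4, b1, b2, b3]
        · simp at hC
          obtain ⟨c1, c2, c3, c4⟩ := hC
          simp [a1, a2, a3, a4, b1, b2, b3, c1, c2, c3, c4]
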